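-- pv_equiv track=rewrite | github.com/ghostcode-ai/liquid-democracy | tally/rcv.py | _pick_loser
-- ===== SOURCE A (Python) =====
-- def _pick_loser(
--     counts: dict[str, int], first_round_counts: dict[str, int]
-- ) -> str:
--     """Pick the candidate to eliminate.
--
--     Tie-breaking order:
--     1. Fewest votes this round
--     2. Fewest first-round votes
--     3. Alphabetically first
--     """
--     min_v = min(counts.values())
--     tied = [c for c, v in counts.items() if v == min_v]
--
--     if len(tied) == 1:
--         return tied[0]
--
--     # Secondary: fewest first-round votes
--     min_first = min(first_round_counts.get(c, 0) for c in tied)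
--     still_tied = [
--         c for c in tied if first_round_counts.get(c, 0) == min_first
--     ]
--
--     # Tertiary: alphabetical
--     return sorted(still_tied)[0]
-- ===== SOURCE B (Python) =====
-- def _pick_loser(
--     counts: dict[str, int], first_round_counts: dict[str, int]
-- ) -> str:
--     """Pick the candidate to eliminate: single pass, one composite key.
--
--     Tuple lexicographic order handles all three tie-break levels at once:
--     (votes this round, first-round votes, name).
--     """
--     return min(
--         counts.items(),
--         key=lambda kv: (kv[1], first_round_counts.get(kv[0], 0), kv[0]),
--     )[0]
-- ===== Notes on version B (the rewrite author's own statement) =====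
-- stated objective: simpler
-- what changed: Replaces the three-stage filter/re-filter/sort cascade with a single min over items keyed by the composite tuple (votes, first-round votes, name), so one pass and tuple lexicographic order do all three tie-breaks.
import Mathlib
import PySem

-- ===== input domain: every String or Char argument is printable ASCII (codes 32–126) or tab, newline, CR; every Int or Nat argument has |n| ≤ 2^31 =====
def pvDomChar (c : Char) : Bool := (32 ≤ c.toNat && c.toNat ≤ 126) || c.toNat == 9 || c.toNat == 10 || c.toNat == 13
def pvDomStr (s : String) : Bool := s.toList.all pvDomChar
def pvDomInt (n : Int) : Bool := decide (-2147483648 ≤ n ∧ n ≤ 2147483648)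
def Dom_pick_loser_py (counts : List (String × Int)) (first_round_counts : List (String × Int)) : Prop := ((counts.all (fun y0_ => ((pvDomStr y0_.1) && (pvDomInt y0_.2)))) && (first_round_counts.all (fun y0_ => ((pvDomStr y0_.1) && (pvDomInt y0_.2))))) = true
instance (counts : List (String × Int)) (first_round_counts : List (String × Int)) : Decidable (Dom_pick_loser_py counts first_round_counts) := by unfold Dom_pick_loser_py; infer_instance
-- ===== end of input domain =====

-- B replaces A's three-stage filter/refilter/sort tie-break cascade by a single min over
-- items under the composite lexicographic key (votes, first-round votes, name): simpler.


-- shared one-line primitive: Python's first_round_counts.get(c, 0) (both A and B call it)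
def pvG (first_round_counts : List (String × Int)) (c : String) : Int :=
  PySem.Dict.getD (PySem.Dict.mk first_round_counts) c 0

-- ===== PORT A =====
-- Literal port of _pick_loser: min of the values, filter the tied, possibly a second
-- min/filter over first-round counts, then sorted(...)[0].  'min' of an empty sequence
-- raises ValueError in Python (PySem.List.min? = none); those inputs are outside Pre_,
-- so the "" in the none-branches is never reached under Pre_.
def pick_loser_py (counts : List (String × Int)) (first_round_counts : List (String × Int)) : String :=
  match PySem.List.min? (counts.map Prod.snd) (fun v => v) with
  | none => ""
  | some min_v =>
    let tied := (counts.filter (fun p => p.2 == min_v)).map Prod.fst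
    if tied.length == 1 then tied.headD ""
    else
      match PySem.List.min? (tied.map (fun c => pvG first_round_counts c)) (fun v => v) with
      | none => ""
      | some min_first =>
        let still_tied := tied.filter (fun c => pvG first_round_counts c == min_first)
        (PySem.List.sorted still_tied (fun x => x) false).headD ""

-- ===== PORT B =====
-- Python's tuple '<' on (int, int, str) is lexicographic; str '<' is Lean's String '<'.
def pvLt3 (a b : Int × Int × String) : Bool :=
  a.1 < b.1 || (a.1 == b.1 && (a.2.1 < b.2.1 || (a.2.1 == b.2.1 && a.2.2 < b.2.2)))

-- the composite key of Source B's lambda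
def pvKey (first_round_counts : List (String × Int)) (kv : String × Int) : Int × Int × String :=
  (kv.2, pvG first_round_counts kv.1, kv.1)

-- min(counts.items(), key=...) ported by hand (exact: Python's min keeps the FIRST element
-- whose key is strictly smaller than the running best's; empty items raise ValueError = the
-- [] branch, outside Pre_).  PySem's min2? covers only 2-component tuple keys.
def pick_loser_py_alt (counts : List (String × Int)) (first_round_counts : List (String × Int)) : String :=
  match counts with
  | [] => ""
  | x :: t =>
    (t.foldl (fun best kv =>
        if pvLt3 (pvKey first_round_counts kv) (pvKey first_round_counts best) then kv else best) x).1

-- ===== PRECONDITION & SPEC =====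
-- Pre_ excludes only the empty counts dict, on which both Pythons raise ValueError (min of empty).
def Pre_pick_loser_py (counts : List (String × Int)) (first_round_counts : List (String × Int)) : Prop := counts ≠ []
instance (counts : List (String × Int)) (first_round_counts : List (String × Int)) : Decidable (Pre_pick_loser_py counts first_round_counts) := by unfold Pre_pick_loser_py; infer_instance

def pvWitness_pick_loser_py : (List (String × Int)) × (List (String × Int)) :=
  ([("a", 1), ("b", 1), ("c", 2)], [("b", 0), ("a", 3)])

def Spec_pick_loser_py (counts : List (String × Int)) (first_round_counts : List (String × Int)) (out : String) : Prop := out = pick_loser_py_alt counts first_round_counts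
instance (counts : List (String × Int)) (first_round_counts : List (String × Int)) (out : String) : Decidable (Spec_pick_loser_py counts first_round_counts out) := by unfold Spec_pick_loser_py; infer_instance

-- ===== CLAIM (what is proved, stated in full; the proofs are below) =====
def Claim_equal_pick_loser_py : Prop := ∀ (counts : List (String × Int)) (first_round_counts : List (String × Int)), Dom_pick_loser_py counts first_round_counts → Pre_pick_loser_py counts first_round_counts → Spec_pick_loser_py counts first_round_counts (pick_loser_py counts first_round_counts)

-- ===== LEMMAS AND PROOFS =====

-- the composite key, read in the genuinely lexicographic order on nested Lex pairs
def pvT (a : Int × Int × String) : Lex (Int × Lex (Int × String)) := toLex (a.1, toLex (a.2.1, a.2.2))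

theorem pvLt3_iff (a b : Int × Int × String) : pvLt3 a b = true ↔ pvT a < pvT b := by
  simp [pvLt3, pvT, Prod.Lex.lt_iff]

theorem pvT_le_iff (a b : Int × Int × String) :
    pvT a ≤ pvT b ↔ a.1 < b.1 ∨ a.1 = b.1 ∧ (a.2.1 < b.2.1 ∨ a.2.1 = b.2.1 ∧ a.2.2 ≤ b.2.2) := by
  simp [pvT, Prod.Lex.le_iff]

theorem pvT_inj_name (a b : Int × Int × String) (h : pvT a = pvT b) : a.2.2 = b.2.2 := by
  simp only [pvT] at h
  have h' := congrArg ofLex h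
  simp only [ofLex_toLex] at h'
  have h2 := congrArg (fun p => ofLex p.2) h'
  simpa using congrArg Prod.snd h2

-- B's fold computes a minimiser of pvT ∘ pvKey over x :: t
theorem pvFold_min (frc : List (String × Int)) (t : List (String × Int)) (x : String × Int) :
    (t.foldl (fun best kv => if pvLt3 (pvKey frc kv) (pvKey frc best) then kv else best) x) ∈ x :: t ∧
    ∀ p ∈ x :: t, pvT (pvKey frc (t.foldl (fun best kv => if pvLt3 (pvKey frc kv) (pvKey frc best) then kv else best) x)) ≤ pvT (pvKey frc p) := by
  induction t generalizing x with
  | nil => simp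
  | cons p t ih =>
    simp only [List.foldl_cons]
    rcases ih (if pvLt3 (pvKey frc p) (pvKey frc x) then p else x) with ⟨hmem, hmin⟩
    set y := (if pvLt3 (pvKey frc p) (pvKey frc x) then p else x) with hy
    have hyx : pvT (pvKey frc y) ≤ pvT (pvKey frc x) := by
      by_cases hc : pvLt3 (pvKey frc p) (pvKey frc x) = true
      · rw [hy, if_pos hc]; exact le_of_lt ((pvLt3_iff _ _).1 hc)
      · rw [hy, if_neg hc]
    have hyp : pvT (pvKey frc y) ≤ pvT (pvKey frc p) := by
      by_cases hc : pvLt3 (pvKey frc p) (pvKey frc x) = true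
      · rw [hy, if_pos hc]
      · rw [hy, if_neg hc]
        exact not_lt.1 (fun hlt => hc ((pvLt3_iff _ _).2 hlt))
    constructor
    · rcases List.mem_cons.1 hmem with h | h
      · by_cases hc : pvLt3 (pvKey frc p) (pvKey frc x) = true
        · rw [h, hy, if_pos hc]; simp
        · rw [h, hy, if_neg hc]; simp
      · simp [List.mem_cons, h]
    · intro q hq
      have hyle := hmin _ (List.mem_cons_self)
      rcases List.mem_cons.1 hq with h | h
      · rw [h]; exact le_trans hyle hyx
      rcases List.mem_cons.1 h with h | h
      · rw [h]; exact le_trans hyle hyp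
      · exact hmin _ (List.mem_cons_of_mem _ h)

-- A's result is a member name whose pair is also pvT-minimal
theorem pvA_min (counts frc : List (String × Int)) (hne : counts ≠ []) :
    ∃ v, (pick_loser_py counts frc, v) ∈ counts ∧
      ∀ p ∈ counts, pvT (pvKey frc (pick_loser_py counts frc, v)) ≤ pvT (pvKey frc p) := by
  have hmapne : counts.map Prod.snd ≠ [] := by simpa using hne
  obtain ⟨min_v, hmv⟩ : ∃ m, PySem.List.min? (counts.map Prod.snd) (fun v => v) = some m := by
    cases h : PySem.List.min? (counts.map Prod.snd) (fun v => v) with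
    | none => exact absurd ((PySem.List.min?_eq_none_iff _ _).1 h) hmapne
    | some m => exact ⟨m, rfl⟩
  have hmv_mem : min_v ∈ counts.map Prod.snd := PySem.List.min?_mem hmv
  have hmv_min : ∀ y ∈ counts.map Prod.snd, min_v ≤ y := PySem.List.min?_isMin hmv
  set tied := (counts.filter (fun p => p.2 == min_v)).map Prod.fst with htied
  have hval_tied : ∀ p ∈ counts, p.2 = min_v → p.1 ∈ tied := by
    intro p hp hv
    exact List.mem_map_of_mem (List.mem_filter.2 ⟨hp, by simp [hv]⟩)
  have htied_mem : ∀ c ∈ tied, (c, min_v) ∈ counts := by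
    intro c hc
    obtain ⟨p, hp, rfl⟩ := List.mem_map.1 hc
    have hf := List.mem_filter.1 hp
    have hv : p.2 = min_v := by simpa using hf.2
    have hm : (p.1, p.2) ∈ counts := by simpa using hf.1
    rwa [hv] at hm
  have htied_ne : tied ≠ [] := by
    obtain ⟨p, hp, hpv⟩ := List.mem_map.1 hmv_mem
    have hmem2 : p.1 ∈ tied := hval_tied p hp hpv
    intro h0; rw [h0] at hmem2; simp at hmem2
  by_cases hlen : tied.length == 1
  · -- a single candidate has the minimal vote count
    obtain ⟨a, hta⟩ : ∃ a, tied = [a] := List.length_eq_one_iff.1 (by simpa using hlen)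
    have hres : pick_loser_py counts frc = a := by
      simp only [pick_loser_py, hmv, ← htied, hta]
      rfl
    refine ⟨min_v, by rw [hres]; exact htied_mem a (by simp [hta]), ?_⟩
    intro p hp
    rw [hres]
    have h1 : min_v ≤ p.2 := hmv_min _ (List.mem_map_of_mem hp)
    rcases lt_or_eq_of_le h1 with h1 | h1
    · rw [pvT_le_iff]; exact Or.inl h1
    · have hin : p.1 ∈ tied := hval_tied p hp h1.symm
      rw [hta] at hin; simp at hin
      rw [pvT_le_iff]
      exact Or.inr ⟨h1, Or.inr ⟨by simp [pvKey, hin], by simp [pvKey, hin]⟩⟩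
  · -- second (first-round votes) and third (alphabetical) tie-break
    have htmapne : tied.map (fun c => pvG frc c) ≠ [] := by simpa using htied_ne
    obtain ⟨min_first, hmf⟩ : ∃ m, PySem.List.min? (tied.map (fun c => pvG frc c)) (fun v => v) = some m := by
      cases h : PySem.List.min? (tied.map (fun c => pvG frc c)) (fun v => v) with
      | none => exact absurd ((PySem.List.min?_eq_none_iff _ _).1 h) htmapne
      | some m => exact ⟨m, rfl⟩
    have hmf_mem : min_first ∈ tied.map (fun c => pvG frc c) := PySem.List.min?_mem hmf
    have hmf_min : ∀ y ∈ tied.map (fun c => pvG frc c), min_first ≤ y := PySem.List.min?_isMin hmf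
    set still := tied.filter (fun c => pvG frc c == min_first) with hstill
    have hstill_ne : still ≠ [] := by
      obtain ⟨c, hc, hcv⟩ := List.mem_map.1 hmf_mem
      intro h0
      have hcm : c ∈ still := List.mem_filter.2 ⟨hc, by simp [hcv]⟩
      rw [h0] at hcm; simp at hcm
    obtain ⟨a, rest, hsa⟩ : ∃ a rest, PySem.List.sorted still (fun x => x) false = a :: rest := by
      cases h : PySem.List.sorted still (fun x => x) false with
      | nil => exact absurd ((PySem.List.sorted_eq_nil_iff _ _ _).1 h) hstill_ne
      | cons a rest => exact ⟨a, rest, rfl⟩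
    have hres : pick_loser_py counts frc = a := by
      simp only [pick_loser_py, hmv, ← htied]
      rw [if_neg (by simpa using hlen), hmf]
      simp only [← hstill, hsa]
      rfl
    have ha_still : a ∈ still := (PySem.List.mem_sorted _ _ _ _).1 (by rw [hsa]; simp)
    have ha_le : ∀ y ∈ still, a ≤ y := PySem.List.key_head_sorted_le still (fun x => x) hsa
    have ha_tied : a ∈ tied := (List.mem_filter.1 ha_still).1
    have hga : pvG frc a = min_first := by simpa using (List.mem_filter.1 ha_still).2
    refine ⟨min_v, by rw [hres]; exact htied_mem a ha_tied, ?_⟩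
    intro p hp
    rw [hres]
    have h1 : min_v ≤ p.2 := hmv_min _ (List.mem_map_of_mem hp)
    rcases lt_or_eq_of_le h1 with h1 | h1
    · rw [pvT_le_iff]; exact Or.inl h1
    · have hpt : p.1 ∈ tied := hval_tied p hp h1.symm
      have h2 : min_first ≤ pvG frc p.1 := hmf_min _ (List.mem_map_of_mem hpt)
      rcases lt_or_eq_of_le h2 with h2 | h2
      · rw [pvT_le_iff]
        exact Or.inr ⟨h1, Or.inl (by simpa [pvKey, hga] using h2)⟩
      · have hps : p.1 ∈ still := List.mem_filter.2 ⟨hpt, by simp [← h2]⟩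
        rw [pvT_le_iff]
        exact Or.inr ⟨h1, Or.inr ⟨by simp [pvKey, hga, ← h2], by simpa [pvKey] using ha_le _ hps⟩⟩

-- ===== VERDICT (by name: the statement is the Claim_ definition above) =====
theorem pick_loser_py_spec : Claim_equal_pick_loser_py := by
  intro counts frc _ hpre
  unfold Spec_pick_loser_py
  match counts with
  | [] => exact absurd rfl hpre
  | x :: t =>
    obtain ⟨v, hmem, hmin⟩ := pvA_min (x :: t) frc (by simp)
    obtain ⟨hbmem, hbmin⟩ := pvFold_min frc t x
    set m := (t.foldl (fun best kv => if pvLt3 (pvKey frc kv) (pvKey frc best) then kv else best) x) with hm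
    have h1 : pvT (pvKey frc (pick_loser_py (x :: t) frc, v)) ≤ pvT (pvKey frc m) := hmin _ hbmem
    have h2 : pvT (pvKey frc m) ≤ pvT (pvKey frc (pick_loser_py (x :: t) frc, v)) := hbmin _ hmem
    have heq := pvT_inj_name _ _ (le_antisymm h1 h2)
    simp only [pvKey] at heq
    simp only [pick_loser_py_alt, ← hm]
    exact heq
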